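-- pv_equiv track=rewrite | github.com/PParkcode/Algorithm | 백준/Gold/17144. 미세먼지 안녕！/미세먼지 안녕！.py | calculate
-- ===== SOURCE A (Python) =====
-- def calculate(graph, r, c):
--     result = 0
--     for i in range(r):
--         for j in range(c):
--             if graph[i][j] == -1:
--                 continue
--             result += graph[i][j]
--     return result
-- ===== SOURCE B (Python) =====
-- def calculate(graph, r, c):
--     # Slice-based: walk the first r rows directly (no index arithmetic),
--     # sum each row's first-c-cells window unconditionally and add back 1
--     # per -1 cell, which cancels its -1 contribution.
--     if r <= 0 or c <= 0:
--         return 0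
--     total = 0
--     for row in graph[:r]:
--         seg = row[:c]
--         total += sum(seg) + seg.count(-1)
--     return total
-- ===== Notes on version B (the rewrite author's own statement) =====
-- stated objective: alternative
-- what changed: B replaces A's nested index loops with a per-cell skip branch by an early return for non-positive bounds plus a single loop over the sliced rows graph[:r], adding sum(row[:c]) + row[:c].count(-1) per row (the +1-per-(-1) correction cancels each -1 cell).
import Mathlib
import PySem

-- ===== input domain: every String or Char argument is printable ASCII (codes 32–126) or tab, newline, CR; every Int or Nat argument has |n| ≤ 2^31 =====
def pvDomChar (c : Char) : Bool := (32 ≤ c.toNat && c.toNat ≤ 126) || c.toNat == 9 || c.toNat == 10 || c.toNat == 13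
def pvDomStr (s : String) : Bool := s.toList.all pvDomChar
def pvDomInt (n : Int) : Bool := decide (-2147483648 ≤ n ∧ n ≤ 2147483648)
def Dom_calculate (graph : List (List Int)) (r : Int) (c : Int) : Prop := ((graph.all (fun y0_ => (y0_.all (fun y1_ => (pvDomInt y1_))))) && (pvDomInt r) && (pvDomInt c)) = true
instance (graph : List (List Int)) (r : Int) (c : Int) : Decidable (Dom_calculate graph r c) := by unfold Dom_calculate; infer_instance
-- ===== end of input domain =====

-- B replaces A's nested index loops with an early return for non-positive bounds plus one loop
-- over the sliced rows graph[:r], adding sum(row[:c]) + row[:c].count(-1) per row: same cost,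
-- different decomposition.


-- ===== PORT A =====
def calculate (graph : List (List Int)) (r : Int) (c : Int) : Int :=
  (PySem.List.pyRange 0 r 1).foldl (fun result i =>
    (PySem.List.pyRange 0 c 1).foldl (fun result j =>
      if PySem.List.pyGetD (PySem.List.pyGetD graph i []) j 0 = -1 then result
      else result + PySem.List.pyGetD (PySem.List.pyGetD graph i []) j 0) result) 0

-- ===== PORT B =====
def calculate_alt (graph : List (List Int)) (r : Int) (c : Int) : Int :=
  if r ≤ 0 ∨ c ≤ 0 then 0
  else
    (PySem.List.slice graph (some 0) (some r)).foldl (fun total row =>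
      let seg := PySem.List.slice row (some 0) (some c)
      total + (seg.sum + (seg.count (-1) : Int))) 0

-- ===== PRECONDITION & SPEC =====
-- Pre_ excludes exactly the inputs on which Python A raises IndexError: positive r, c with
-- r exceeding len(graph) or some addressed row shorter than c (for r ≤ 0 or c ≤ 0 the loops
-- are empty and nothing is indexed, so those inputs stay inside Pre_).
def Pre_calculate (graph : List (List Int)) (r : Int) (c : Int) : Prop :=
  r ≤ 0 ∨ c ≤ 0 ∨ (r ≤ (graph.length : Int) ∧ ∀ row ∈ graph.take r.toNat, c ≤ (row.length : Int))
instance (graph : List (List Int)) (r : Int) (c : Int) : Decidable (Pre_calculate graph r c) := by unfold Pre_calculate; infer_instance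
def pvWitness_calculate : List (List Int) × Int × Int := ([[1, -1, 3], [4, 5, -1]], 2, 3)

def Spec_calculate (graph : List (List Int)) (r : Int) (c : Int) (out : Int) : Prop := out = calculate_alt graph r c
instance (graph : List (List Int)) (r : Int) (c : Int) (out : Int) : Decidable (Spec_calculate graph r c out) := by unfold Spec_calculate; infer_instance

-- ===== CLAIM (what is proved, stated in full; the proofs are below) =====
def Claim_equal_calculate : Prop := ∀ (graph : List (List Int)) (r : Int) (c : Int), Dom_calculate graph r c → Pre_calculate graph r c → Spec_calculate graph r c (calculate graph r c)

-- ===== LEMMAS AND PROOFS =====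

-- A's skip-(-1) accumulation over the indices equals raw sum plus count of -1 of the fetched
-- cells (each -1 adds -1 + 1 = 0), for any row and any index list.
theorem skip_fold (row : List Int) (ks : List Int) (a : Int) :
    ks.foldl (fun res j => if PySem.List.pyGetD row j 0 = -1 then res
        else res + PySem.List.pyGetD row j 0) a
      = a + ((ks.map (fun j => PySem.List.pyGetD row j 0)).sum
          + ((ks.map (fun j => PySem.List.pyGetD row j 0)).count (-1) : Int)) := by
  induction ks generalizing a with
  | nil => simp
  | cons k t ih =>
    by_cases hk : PySem.List.pyGetD row k 0 = -1 <;>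
      simp [hk, ih] <;> ring

-- Fetching xs[0..c) by index equals the prefix xs.take c.toNat when the indices are in range.
theorem map_get_take {α : Type} (xs : List α) (d : α) (c : Int)
    (h0 : 0 ≤ c) (hl : c ≤ (xs.length : Int)) :
    (PySem.List.pyRange 0 c 1).map (fun j => PySem.List.pyGetD xs j d) = xs.take c.toNat := by
  apply List.ext_getElem
  · simp [PySem.List.length_pyRange_one]; omega
  · intro k hk1 hk2
    have hk : k < c.toNat := by simp [PySem.List.length_pyRange_one] at hk1; omega
    have hkx : k < xs.length := by omega
    simp only [List.getElem_map, PySem.List.getElem_pyRange_one, List.getElem_take]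
    rw [show (0 : Int) + k = ((k : Nat) : Int) by omega, PySem.List.pyGetD_natCast]
    simp [List.getD, hkx]

theorem calculate_spec : Claim_equal_calculate := by
  intro graph r c _ hpre
  unfold Spec_calculate calculate calculate_alt
  by_cases hr : r ≤ 0
  · simp [PySem.List.pyRange_one_eq_nil hr, hr]
  by_cases hc : c ≤ 0
  · simp [PySem.List.pyRange_one_eq_nil hc, hc, List.foldl_fixed]
  -- main case: 0 < r, 0 < c, so Pre_ gives the bounds
  obtain h | h | ⟨hrlen, hrow⟩ := hpre
  · omega
  · omega
  simp only [if_neg (by omega : ¬ (r ≤ 0 ∨ c ≤ 0))]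
  -- B's outer slice is the prefix of rows
  rw [PySem.List.slice_zero_start, PySem.List.slice_to _ (by omega : (0:Int) ≤ r)]
  -- A: inner loop → per-row sum + count, via skip_fold, then the row window via map_get_take
  have hA : ∀ acc : Int, ∀ i ∈ PySem.List.pyRange 0 r 1,
      (PySem.List.pyRange 0 c 1).foldl (fun result j =>
        if PySem.List.pyGetD (PySem.List.pyGetD graph i []) j 0 = -1 then result
        else result + PySem.List.pyGetD (PySem.List.pyGetD graph i []) j 0) acc
      = acc + (((PySem.List.pyGetD graph i []).take c.toNat).sum
          + ((((PySem.List.pyGetD graph i []).take c.toNat).count (-1)) : Int)) := by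
    intro acc i hi
    rw [skip_fold]
    rw [PySem.List.mem_pyRange_one] at hi
    have hrowlen : c ≤ (((PySem.List.pyGetD graph i []).length : Nat) : Int) := by
      have hmem : PySem.List.pyGetD graph i [] ∈ graph.take r.toNat := by
        rw [PySem.List.pyGetD_eq_getElem graph ([] : List Int) hi.1 (by omega)]
        exact List.mem_take_iff_getElem.mpr ⟨i.toNat, by omega, rfl⟩
      exact hrow _ hmem
    rw [map_get_take _ _ _ (by omega) hrowlen]
  rw [PySem.List.foldl_congr_mem _ _ (fun acc i =>
        acc + (((PySem.List.pyGetD graph i []).take c.toNat).sum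
          + ((((PySem.List.pyGetD graph i []).take c.toNat).count (-1)) : Int))) _ hA]
  rw [PySem.List.foldl_add _ (fun i => ((PySem.List.pyGetD graph i []).take c.toNat).sum
        + ((((PySem.List.pyGetD graph i []).take c.toNat).count (-1)) : Int))]
  rw [PySem.List.foldl_add _ (fun row => (PySem.List.slice row (some 0) (some c)).sum
        + (((PySem.List.slice row (some 0) (some c)).count (-1)) : Int))]
  congr 1
  rw [← map_get_take graph ([] : List Int) r (by omega) hrlen, List.map_map]
  congr 1
  apply List.map_congr_left
  intro i _
  simp only [Function.comp]
  rw [PySem.List.slice_zero_start, PySem.List.slice_to _ (by omega : (0:Int) ≤ c)]
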